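-- pv_equiv track=rewrite | github.com/GTimothee/io_optimizer_dask | optimize_io/modifiers.py | get_unused_keys
-- ===== SOURCE A (Python) =====
-- def get_unused_keys(remade_graph):
--     """ find keys in the graph that are not used as values by another(other) key(s)
--     """
--     keys = list(remade_graph.keys())
--     vals = list(remade_graph.values())
--     flatten = list()
--
--     # flatten the values which is a list of lists
--     # because get_graph_from_dask which is using add_to_dict_of_lists
--     for l in vals:
--         for e in l:
--             flatten.append(e)
--
--     # do the actual job
--     unused_keys = list()
--     for key in keys:
--         if key not in flatten:
--             unused_keys.append(key)
--
--     return unused_keys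
-- ===== SOURCE B (Python) =====
-- def get_unused_keys(remade_graph):
--     """ find keys in the graph that are not used as values by another(other) key(s) """
--     unused = dict.fromkeys(remade_graph.keys())
--     for l in remade_graph.values():
--         for e in l:
--             unused.pop(e, None)
--     return list(unused)
-- ===== Notes on version B (the rewrite author's own statement) =====
-- stated objective: faster
-- what changed: Instead of flattening all values and re-scanning that list once per key, B builds an order-preserving dict of all keys and pops each value element out of it in one pass over the values, returning the surviving keys.
import Mathlib
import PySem

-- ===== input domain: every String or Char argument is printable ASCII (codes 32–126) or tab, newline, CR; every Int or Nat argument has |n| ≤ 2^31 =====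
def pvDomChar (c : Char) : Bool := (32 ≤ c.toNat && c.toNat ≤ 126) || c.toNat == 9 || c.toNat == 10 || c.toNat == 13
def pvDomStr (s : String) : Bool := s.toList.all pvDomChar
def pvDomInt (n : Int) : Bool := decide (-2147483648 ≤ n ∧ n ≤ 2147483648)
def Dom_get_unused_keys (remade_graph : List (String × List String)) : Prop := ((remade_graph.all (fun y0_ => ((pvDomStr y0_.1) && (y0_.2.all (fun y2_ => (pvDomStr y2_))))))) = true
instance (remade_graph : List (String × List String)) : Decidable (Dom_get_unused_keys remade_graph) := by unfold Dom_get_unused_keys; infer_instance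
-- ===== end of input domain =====

-- B replaces A's per-key rescan of the flattened value list by one pass over the values
-- popping used keys from an order-preserving dict of all keys (objective: faster).


-- ===== PORT A =====
def get_unused_keys (remade_graph : List (String × List String)) : List String :=
  let d := PySem.Dict.ofList remade_graph
  let keys := d.keys                      -- list(remade_graph.keys())
  let vals := d.values                    -- list(remade_graph.values())
  -- flatten the values (list of lists)
  let flatten := vals.foldl (fun acc l => l.foldl (fun acc e => acc ++ [e]) acc) ([] : List String)
  -- do the actual job
  keys.foldl (fun acc key => if flatten.contains key then acc else acc ++ [key]) []

-- ===== PORT B =====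
def get_unused_keys_alt (remade_graph : List (String × List String)) : List String :=
  let d := PySem.Dict.ofList remade_graph
  -- unused = dict.fromkeys(remade_graph.keys())
  let unused : PySem.Dict String (Option Unit) :=
    d.keys.foldl (fun u k => u.insert k none) PySem.Dict.empty
  -- for l in remade_graph.values(): for e in l: unused.pop(e, None)  (pop with default = erase)
  let unused := d.values.foldl (fun u l => l.foldl (fun u e => u.erase e) u) unused
  unused.keys                             -- list(unused)

-- ===== PRECONDITION & SPEC =====
def Spec_get_unused_keys (remade_graph : List (String × List String)) (out : List String) : Prop := out = get_unused_keys_alt remade_graph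
instance (remade_graph : List (String × List String)) (out : List String) : Decidable (Spec_get_unused_keys remade_graph out) := by unfold Spec_get_unused_keys; infer_instance

-- ===== CLAIM (what is proved, stated in full; the proofs are below) =====
def Claim_equal_get_unused_keys : Prop := ∀ (remade_graph : List (String × List String)), Dom_get_unused_keys remade_graph → Spec_get_unused_keys remade_graph (get_unused_keys remade_graph)

-- ===== LEMMAS AND PROOFS =====

-- A's inner flatten loop appends the list
theorem pv_foldl_append_singleton (l acc : List String) :
    l.foldl (fun acc e => acc ++ [e]) acc = acc ++ l := by
  induction l generalizing acc with
  | nil => simp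
  | cons x xs ih => simp [List.foldl, ih]

theorem pv_foldl_app (ls : List (List String)) (acc : List String) :
    ls.foldl (fun a l => a ++ l) acc = acc ++ ls.flatten := by
  induction ls generalizing acc with
  | nil => simp
  | cons l ls ih => simp [List.foldl, ih]

-- A's filtering loop
theorem pv_foldl_skip_if (c : String → Bool) (keys acc : List String) :
    keys.foldl (fun acc k => if c k then acc else acc ++ [k]) acc
      = acc ++ keys.filter (fun k => !c k) := by
  induction keys generalizing acc with
  | nil => simp
  | cons k ks ih =>
    cases h : c k <;> simp [List.foldl, List.filter, h, ih]

-- erasing a key filters the key list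
theorem pv_keys_erase {ν : Type} (u : PySem.Dict String ν) (e : String) :
    (u.erase e).keys = u.keys.filter (fun k => !(k == e)) := by
  have hitems : (u.erase e).items = u.items.filter (fun p => !(p.1 == e)) := rfl
  show (u.erase e).items.map (·.1) = (u.items.map (·.1)).filter (fun k => !(k == e))
  rw [hitems]
  induction u.items with
  | nil => simp
  | cons p ps ih =>
    cases h : (p.1 == e) <;> simp [List.filter, h, ih]

-- folding erase over a list filters out its members
theorem pv_keys_foldl_erase {ν : Type} (f : List String) (u : PySem.Dict String ν) :
    (f.foldl (fun u e => u.erase e) u).keys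
      = u.keys.filter (fun k => !(f.contains k)) := by
  induction f generalizing u with
  | nil => simp
  | cons e fs ih =>
    rw [List.foldl_cons, ih, pv_keys_erase, List.filter_filter]
    apply List.filter_congr
    intro k _
    cases h : k == e <;> simp_all [Bool.and_comm]

theorem get_unused_keys_eq (g : List (String × List String)) :
    get_unused_keys g = get_unused_keys_alt g := by
  unfold get_unused_keys get_unused_keys_alt
  set d := PySem.Dict.ofList g with hd
  -- A's flatten is the flattened values
  have hflat : d.values.foldl (fun acc l => l.foldl (fun acc e => acc ++ [e]) acc) ([] : List String)
      = d.values.flatten := by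
    have : (fun (acc : List String) (l : List String) => l.foldl (fun acc e => acc ++ [e]) acc)
        = fun acc l => acc ++ l := by
      funext acc l; exact pv_foldl_append_singleton l acc
    rw [this, pv_foldl_app]
    simp
  -- B's fromkeys dict has exactly d's keys
  have hkeys : (d.keys.foldl (fun u k => u.insert k (none : Option Unit)) PySem.Dict.empty).keys
      = d.keys := by
    rw [PySem.Dict.keys_foldl_insert]
    simp [PySem.Dict.keys_empty, PySem.Set.update_nil_left]
    exact PySem.Set.ofList_eq_self_of_nodup _ (PySem.Dict.nodup_keys_ofList g)
  -- B's nested erase loop is an erase fold over the flattened values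
  have hnest : ∀ (u : PySem.Dict String (Option Unit)),
      d.values.foldl (fun u l => l.foldl (fun u e => u.erase e) u) u
        = (d.values.flatten).foldl (fun u e => u.erase e) u := by
    intro u; rw [List.foldl_flatten]
  simp only [hflat, hnest, pv_keys_foldl_erase, hkeys,
    pv_foldl_skip_if (fun key => (d.values.flatten).contains key) d.keys []]
  simp

-- ===== VERDICT (by name: the statement is the Claim_ definition above) =====
theorem get_unused_keys_spec : Claim_equal_get_unused_keys := by
  intro g _
  unfold Spec_get_unused_keys
  exact get_unused_keys_eq g
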